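-- pv_equiv track=rewrite | github.com/kahlouie/Exercise04finaltry | list_operations.py | custom_equality
-- ===== SOURCE A (Python) =====
-- def custom_len(input_list):
--     # """custom_len(input_list) imitates len(input_list)"""
--     count = 0
--     for i in input_list:
--         count += 1
--     return count
--
-- def custom_equality(some_list, another_list):
--     """custom_equality(some_list, another_list) imitates
--     (some_list == another_list)
--     """
--     if custom_len(some_list) != custom_len(another_list):
--         return False
--     else:
--         for i in range(custom_len(some_list)):
--             if some_list[i] != another_list[i]:
--                 return False
--
--     return True
-- ===== SOURCE B (Python) =====
-- from itertools import zip_longest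
--
-- def custom_equality(some_list, another_list):
--     missing = object()
--     for a, b in zip_longest(some_list, another_list, fillvalue=missing):
--         if a is missing or b is missing or a != b:
--             return False
--     return True
-- ===== Notes on version B (the rewrite author's own statement) =====
-- stated objective: simpler
-- what changed: Single simultaneous pass with zip_longest and a fresh sentinel replaces the three custom_len traversals plus the indexed range loop.
import Mathlib
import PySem

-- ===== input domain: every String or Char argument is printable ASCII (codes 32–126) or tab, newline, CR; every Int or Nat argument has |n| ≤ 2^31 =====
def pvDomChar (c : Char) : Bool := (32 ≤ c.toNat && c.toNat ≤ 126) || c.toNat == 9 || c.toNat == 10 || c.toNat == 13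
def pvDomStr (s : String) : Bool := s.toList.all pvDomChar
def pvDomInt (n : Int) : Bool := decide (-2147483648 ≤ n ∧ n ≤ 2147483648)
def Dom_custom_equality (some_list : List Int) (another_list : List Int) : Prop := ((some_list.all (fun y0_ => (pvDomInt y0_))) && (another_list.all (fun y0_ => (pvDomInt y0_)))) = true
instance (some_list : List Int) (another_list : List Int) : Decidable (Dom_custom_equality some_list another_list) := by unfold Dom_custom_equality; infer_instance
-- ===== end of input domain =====

-- B replaces A's three length traversals plus indexed range loop by one simultaneous
-- structural pass over both lists (Python: zip_longest with a fresh sentinel); objective: simpler.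

-- ===== PORT A =====
def custom_len (input_list : List Int) : Int :=
  input_list.foldl (fun count _ => count + 1) 0

def custom_equality (some_list : List Int) (another_list : List Int) : Bool :=
  if custom_len some_list ≠ custom_len another_list then
    false
  else
    -- 'for i in range(...): if some_list[i] != another_list[i]: return False' then 'return True'
    (PySem.List.pyRange 0 (custom_len some_list) 1).all
      (fun i => PySem.List.pyGet? some_list i == PySem.List.pyGet? another_list i)

-- ===== PORT B =====
-- zip_longest with a fresh sentinel: a mismatched pair (including any pair containing
-- the sentinel, i.e. one list exhausted) returns False; loop completing returns True.
def custom_equality_alt (some_list : List Int) (another_list : List Int) : Bool :=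
  match some_list, another_list with
  | [], [] => true
  | x :: xs, y :: ys => if x ≠ y then false else custom_equality_alt xs ys
  | _, _ => false

-- ===== PRECONDITION & SPEC =====
def Spec_custom_equality (some_list : List Int) (another_list : List Int) (out : Bool) : Prop := out = custom_equality_alt some_list another_list
instance (some_list : List Int) (another_list : List Int) (out : Bool) : Decidable (Spec_custom_equality some_list another_list out) := by unfold Spec_custom_equality; infer_instance

-- ===== CLAIM (what is proved, stated in full; the proofs are below) =====
def Claim_equal_custom_equality : Prop := ∀ (some_list : List Int) (another_list : List Int), Dom_custom_equality some_list another_list → Spec_custom_equality some_list another_list (custom_equality some_list another_list)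

-- ===== LEMMAS AND PROOFS =====

theorem custom_len_foldl (l : List Int) (c : Int) :
    l.foldl (fun count _ => count + 1) c = c + l.length := by
  induction l generalizing c with
  | nil => simp
  | cons x xs ih => simp [List.foldl, ih]; ring

theorem custom_len_eq (l : List Int) : custom_len l = (l.length : Int) := by
  simp [custom_len, custom_len_foldl]

theorem alt_eq_decide (s a : List Int) : custom_equality_alt s a = decide (s = a) := by
  induction s generalizing a with
  | nil => cases a <;> simp [custom_equality_alt]
  | cons x xs ih =>
    cases a with
    | nil => simp [custom_equality_alt]
    | cons y ys =>
      by_cases h : x = y <;> simp [custom_equality_alt, h, ih]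

theorem a_eq_decide (s a : List Int) : custom_equality s a = decide (s = a) := by
  unfold custom_equality
  rw [custom_len_eq s, custom_len_eq a]
  by_cases h : (s.length : Int) = (a.length : Int)
  · have hlen : s.length = a.length := by exact_mod_cast h
    simp only [h, ne_eq, not_true_eq_false, if_false]
    rw [Bool.eq_iff_iff]
    simp only [List.all_eq_true, decide_eq_true_eq, beq_iff_eq]
    constructor
    · intro hall
      apply List.ext_getElem? 
      intro n
      by_cases hn : n < s.length
      · have := hall ((n : Int)) (by
          rw [PySem.List.mem_pyRange_one]; omega)
        simpa [PySem.List.pyGet?_natCast] using this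
      · rw [List.getElem?_eq_none (by omega), List.getElem?_eq_none (by omega)]
    · rintro rfl i _; rfl
  · simp only [ne_eq, h, not_false_eq_true, if_pos]
    have : s ≠ a := by intro hsa; subst hsa; exact h rfl
    simp [this]

-- ===== VERDICT (by name: the statement is the Claim_ definition above) =====
theorem custom_equality_spec : Claim_equal_custom_equality := by
  intro s a _
  unfold Spec_custom_equality
  rw [a_eq_decide, alt_eq_decide]
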